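-- pv_equiv track=rewrite | github.com/B-UMMI/proBait | baits_design.py | determine_interval_baits
-- ===== SOURCE A (Python) =====
-- def determine_interval_baits(bait_size, start, stop):
--     """ Determines baits for regions with length value
--         equal or greater than bait size.
--
--         Parameters
--         ----------
--         bait_size : int
--             Bait size in bases.
--         start : int
--             Start position of the subsequence that is
--             not covered.
--         stop : int
--             Stop position of the subsequence that is
--             not covered.
--
--         Returns
--         -------
--         probes : list of list
--             List with one sublist per determined bait.
--             Each sublist has the start and stop position
--             for a bait.
--     """
--
--     probes = []
--     reach = False
--     while reach is False:
--         if (start + bait_size) == stop: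
--             bait_interval = [start, stop]
--             reach = True
--         elif (start + bait_size) > stop:
--             diff = (start + bait_size) - stop
--             bot_plus = start - diff
--             bait_interval = [bot_plus, stop]
--             reach = True
--         else:
--             bait_interval = [start, start + bait_size]
--             start = start + bait_size
--         probes.append(bait_interval)
--
--     return probes
-- ===== SOURCE B (Python) =====
-- def determine_interval_baits(bait_size, start, stop):
--     m = max(0, (stop - start - 1) // bait_size)
--     probes = [[start + i * bait_size, start + (i + 1) * bait_size] for i in range(m)]
--     p = start + m * bait_size
--     if p + bait_size == stop:
--         probes.append([p, stop])
--     else: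
--         probes.append([stop - bait_size, stop])
--     return probes
-- ===== Notes on version B (the rewrite author's own statement) =====
-- stated objective: simpler
-- what changed: Replaced the incremental while-loop with a closed-form count of full baits, a comprehension generating them, and explicit handling of the single final bait.
-- outside the precondition, e.g. on determine_interval_baits(0, 5, 5): A returns [[5, 5]], B raises ZeroDivisionError; on determine_interval_baits(-2, 5, 3): A returns [[5, 3]], B returns [[5, 3], [5, 3]]
import Mathlib
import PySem

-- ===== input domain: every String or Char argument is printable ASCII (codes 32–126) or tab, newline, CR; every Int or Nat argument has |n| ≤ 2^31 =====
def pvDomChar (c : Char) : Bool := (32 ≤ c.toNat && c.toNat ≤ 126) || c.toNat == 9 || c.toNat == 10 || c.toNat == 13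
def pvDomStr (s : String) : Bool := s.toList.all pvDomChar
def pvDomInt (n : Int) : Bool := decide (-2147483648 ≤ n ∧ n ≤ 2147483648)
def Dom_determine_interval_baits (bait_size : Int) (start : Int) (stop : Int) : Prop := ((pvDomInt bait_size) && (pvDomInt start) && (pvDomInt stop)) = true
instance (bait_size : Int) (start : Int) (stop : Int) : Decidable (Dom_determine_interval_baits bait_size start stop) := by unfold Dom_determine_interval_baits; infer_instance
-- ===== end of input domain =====

-- B replaces A's incremental while-loop by a closed-form count of full baits plus an
-- explicit final bait (objective: simpler decomposition, same asymptotic cost).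


-- ===== PORT A =====
-- A's while-loop as fuel-bounded recursion; the fuel only makes the function total
-- (inside Pre_ the fuel is never exhausted, see loopA_eq_alt below).
def loopA (bait_size : Int) (stop : Int) : Nat → Int → List (List Int) → List (List Int)
  | 0, _, probes => probes
  | fuel + 1, start, probes =>
    if start + bait_size = stop then
      probes ++ [[start, stop]]
    else if start + bait_size > stop then
      probes ++ [[start - ((start + bait_size) - stop), stop]]
    else
      loopA bait_size stop fuel (start + bait_size) (probes ++ [[start, start + bait_size]])

def determine_interval_baits (bait_size : Int) (start : Int) (stop : Int) : List (List Int) :=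
  loopA bait_size stop ((stop - start).toNat + 1) start []

-- ===== PORT B =====
def determine_interval_baits_alt (bait_size : Int) (start : Int) (stop : Int) : List (List Int) :=
  let m : Int := max 0 (PySem.Int.floordiv (stop - start - 1) bait_size)
  let probes : List (List Int) :=
    (List.range m.toNat).map (fun (i : Nat) => [start + (i : Int) * bait_size, start + ((i : Int) + 1) * bait_size])
  let p : Int := start + m * bait_size
  if p + bait_size = stop then
    probes ++ [[p, stop]]
  else
    probes ++ [[stop - bait_size, stop]]

-- ===== PRECONDITION & SPEC =====
-- Pre_ excludes non-positive bait_size: there A loops forever whenever start+bait_size < stop,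
-- and on the remaining degenerate inputs B's integer division by bait_size raises (bait_size = 0)
-- or B tiles a reversed interval differently (see claim cites).
def Pre_determine_interval_baits (bait_size : Int) (start : Int) (stop : Int) : Prop := 0 < bait_size
instance (bait_size : Int) (start : Int) (stop : Int) : Decidable (Pre_determine_interval_baits bait_size start stop) := by unfold Pre_determine_interval_baits; infer_instance
def pvWitness_determine_interval_baits : Int × Int × Int := (20, 3, 75)

def Spec_determine_interval_baits (bait_size : Int) (start : Int) (stop : Int) (out : List (List Int)) : Prop := out = determine_interval_baits_alt bait_size start stop
instance (bait_size : Int) (start : Int) (stop : Int) (out : List (List Int)) : Decidable (Spec_determine_interval_baits bait_size start stop out) := by unfold Spec_determine_interval_baits; infer_instance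

-- ===== CLAIM (what is proved, stated in full; the proofs are below) =====
def Claim_equal_determine_interval_baits : Prop := ∀ (bait_size : Int) (start : Int) (stop : Int), Dom_determine_interval_baits bait_size start stop → Pre_determine_interval_baits bait_size start stop → Spec_determine_interval_baits bait_size start stop (determine_interval_baits bait_size start stop)

-- ===== LEMMAS AND PROOFS =====

-- B's body with the bait count m abstracted and the lets substituted (proof helper)
def altE (b s e m : Int) : List (List Int) :=
  ((List.range m.toNat).map (fun (i : Nat) => [s + (i : Int) * b, s + ((i : Int) + 1) * b])) ++
  (if s + m * b + b = e then [[s + m * b, e]] else [[e - b, e]])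

lemma alt_eq (b s e : Int) :
    determine_interval_baits_alt b s e = altE b s e (max 0 (PySem.Int.floordiv (e - s - 1) b)) := by
  simp only [determine_interval_baits_alt, altE]
  split <;> rfl

lemma altE_zero (b s e : Int) : altE b s e 0 = if s + b = e then [[s, e]] else [[e - b, e]] := by
  simp [altE]

-- the count of full baits is 0 when one bait reaches (or passes) stop
lemma m_eq_zero {b s e : Int} (hb : 0 < b) (h : e ≤ s + b) :
    max 0 (PySem.Int.floordiv (e - s - 1) b) = 0 := by
  rw [PySem.Int.floordiv_eq_ediv_of_pos hb]
  have : (e - s - 1) / b ≤ 0 := by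
    have h1 : e - s - 1 ≤ b - 1 := by omega
    calc (e - s - 1) / b ≤ (b - 1) / b := Int.ediv_le_ediv hb h1
    _ = 0 := Int.ediv_eq_zero_of_lt (by omega) (by omega)
  omega

-- one more full bait fits: the count steps by one
lemma m_succ {b s e : Int} (hb : 0 < b) (h : s + b < e) :
    max 0 (PySem.Int.floordiv (e - s - 1) b) =
    max 0 (PySem.Int.floordiv (e - (s + b) - 1) b) + 1 := by
  rw [PySem.Int.floordiv_eq_ediv_of_pos hb, PySem.Int.floordiv_eq_ediv_of_pos hb]
  have key : (e - s - 1) / b = (e - (s + b) - 1) / b + 1 := by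
    have h0 : e - s - 1 = (e - (s + b) - 1) + 1 * b := by ring
    rw [h0, Int.add_mul_ediv_right _ _ (by omega : b ≠ 0)]
  have h2 : 0 ≤ (e - (s + b) - 1) / b := Int.ediv_nonneg (by omega) (by omega)
  omega

-- B's list satisfies A's loop recurrence
lemma altE_step {b s e m : Int} (hm : 0 ≤ m) :
    altE b s e (m + 1) = [s, s + b] :: altE b (s + b) e m := by
  unfold altE
  have hcond : s + (m + 1) * b = (s + b) + m * b := by ring
  have ht : (m + 1).toNat = m.toNat + 1 := by omega
  rw [hcond, ht, List.range_succ_eq_map, List.map_cons, List.map_map]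
  simp only [Nat.cast_zero, List.cons_append]
  congr 1
  · norm_num
  · congr 1
    apply List.map_congr_left
    intro i _
    simp only [Function.comp]
    push_cast
    have e1 : s + ((i : Int) + 1) * b = s + b + (i : Int) * b := by ring
    have e2 : s + ((i : Int) + 1 + 1) * b = s + b + ((i : Int) + 1) * b := by ring
    rw [e1, e2]

-- with enough fuel, A's loop produces exactly B's list (appended to the accumulator)
lemma loopA_eq_alt (b e : Int) (hb : 0 < b) :
    ∀ (fuel : Nat) (s : Int) (probes : List (List Int)),
      (e - s).toNat < fuel →
      loopA b e fuel s probes = probes ++ determine_interval_baits_alt b s e := by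
  intro fuel
  induction fuel with
  | zero => intro s probes h; omega
  | succ n ih =>
    intro s probes h
    unfold loopA
    by_cases h1 : s + b = e
    · rw [if_pos h1, alt_eq, m_eq_zero hb (by omega), altE_zero, if_pos h1]
    · rw [if_neg h1]
      by_cases h2 : s + b > e
      · rw [if_pos h2, alt_eq, m_eq_zero hb (by omega), altE_zero, if_neg h1]
        have hd : s - (s + b - e) = e - b := by ring
        rw [hd]
      · rw [if_neg h2]
        have hlt : s + b < e := by omega
        rw [ih (s + b) (probes ++ [[s, s + b]]) (by omega)]
        rw [alt_eq b s e, m_succ hb hlt, altE_step (le_max_left _ _), ← alt_eq b (s + b) e]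
        simp

-- ===== VERDICT (by name: the statement is the Claim_ definition above) =====
theorem determine_interval_baits_spec : Claim_equal_determine_interval_baits := by
  intro b s e _ hpre
  unfold Spec_determine_interval_baits determine_interval_baits
  rw [loopA_eq_alt b e hpre ((e - s).toNat + 1) s [] (by omega)]
  simp
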